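-- pv_equiv track=rewrite | github.com/huawei-csl/sprout-hdl | sprouthdl/arithmetic/prefix_adders/prefix_adder.py | P_sklansky
-- ===== SOURCE A (Python) =====
-- from typing import Any, Dict, List, Set, Tuple, Iterable, Optional, TypeAlias
--
-- Pair = Tuple[int, int]
--
-- def P_sklansky(n: int) -> Set[Pair]:
--     """
--     Sklansky (divide&conquer): for stage s, block=2^{s+1}, half=2^s.
--     For each block starting at g, connect all i in [g+half .. g+block-1] to j=g.
--     """
--     nodes: Set[Pair] = set()
--     s = 0
--     while (1 << (s + 1)) <= n:
--         block = 1 << (s + 1)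
--         half = 1 << s
--         for g in range(0, n, block):
--             j = g
--             upper = min(g + block - 1, n - 1)
--             for i in range(g + half, upper + 1):
--                 nodes.add((i, j))
--         s += 1
--     return nodes
-- ===== SOURCE B (Python) =====
-- def P_sklansky(n: int):
--     """
--     Sklansky edges as one flat set comprehension: the stage count is the
--     closed form n.bit_length() - 1, and for stage s a node i is connected
--     iff bit s of i is set, to the start of its block, i with the low s+1
--     bits cleared (i >> (s+1) << (s+1)).  No block loop, no running g/upper.
--     """
--     stages = n.bit_length() - 1 if n > 0 else 0
--     return {(i, i >> (s + 1) << (s + 1))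
--             for s in range(stages)
--             for i in range(n)
--             if (i >> s) & 1}
-- ===== Notes on version B (the rewrite author's own statement) =====
-- stated objective: simpler
-- what changed: Replaces the while-loop over stages with the closed-form stage count n.bit_length()-1 and collapses the block/element double loop into one flat comprehension that tests bit s of i and clears the low s+1 bits to get the block start, removing the running g/upper bookkeeping entirely.
import Mathlib
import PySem

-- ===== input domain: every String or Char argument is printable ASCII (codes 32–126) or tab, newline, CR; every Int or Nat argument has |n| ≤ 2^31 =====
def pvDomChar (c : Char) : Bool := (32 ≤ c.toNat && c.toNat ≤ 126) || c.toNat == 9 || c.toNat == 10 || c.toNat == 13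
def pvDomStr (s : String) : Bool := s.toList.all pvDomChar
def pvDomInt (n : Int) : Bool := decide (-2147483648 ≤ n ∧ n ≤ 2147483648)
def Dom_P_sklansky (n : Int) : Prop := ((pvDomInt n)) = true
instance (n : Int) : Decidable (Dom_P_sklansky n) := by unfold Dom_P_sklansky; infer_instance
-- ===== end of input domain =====

-- B replaces A's while/block/element triple loop by a closed-form stage count
-- (bit_length) and one flat comprehension using bit arithmetic (objective: simpler).

-- ===== PORT A =====
-- used by the while-loop's termination argument
theorem pv_shift_lt {s : Nat} {n : Int} (h : (1 : Int) <<< (s + 1) ≤ n) :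
    s + 1 ≤ n.toNat := by
  rw [Int.shiftLeft_eq, one_mul] at h
  have h2 : (s + 1 : Nat) < 2 ^ (s + 1) := Nat.lt_two_pow_self
  have : ((s + 1 : Nat) : Int) < 2 ^ (s + 1) := by exact_mod_cast h2
  omega

-- while (1 << (s+1)) <= n: … s += 1
def P_sklansky_go (n : Int) (s : Nat) (nodes : PySem.Set (Int × Int)) :
    PySem.Set (Int × Int) :=
  if h : (1 : Int) <<< (s + 1) ≤ n then
    let block : Int := (1 : Int) <<< (s + 1)
    let half : Int := (1 : Int) <<< s
    let nodes' :=
      (PySem.List.pyRange 0 n block).foldl (fun acc g =>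
        let j := g
        let upper := min (g + block - 1) (n - 1)
        (PySem.List.pyRange (g + half) (upper + 1) 1).foldl
          (fun a i => PySem.Set.add a (i, j)) acc) nodes
    P_sklansky_go n (s + 1) nodes'
  else nodes
termination_by n.toNat - s
decreasing_by have := pv_shift_lt h; omega

def P_sklansky (n : Int) : List (Int × Int) :=
  P_sklansky_go n 0 PySem.Set.empty

-- ===== PORT B =====
-- 'stages = n.bit_length() - 1 if n > 0 else 0', then the set comprehension
-- '{(i, i >> (s+1) << (s+1)) for s in range(stages) for i in range(n) if (i >> s) & 1}'.
-- 's' runs over range(stages), a list of nonnegative ints, ported as 'List.range stages'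
-- (s : Nat), so Python's 'i >> s' / 'i >> (s+1) << (s+1)' are exactly Lean's
-- 'i >>> s' / '(i >>> (s+1)) <<< (s+1)'; the truthiness test '(i >> s) & 1' is '!= 0'.
def P_sklansky_alt (n : Int) : List (Int × Int) :=
  let stages : Nat := if 0 < n then PySem.Int.bitLength n - 1 else 0
  PySem.Set.ofList ((List.range stages).flatMap (fun (s : Nat) =>
    ((PySem.List.pyRange 0 n 1).filter (fun (i : Int) => PySem.Int.band (i >>> s) 1 != 0)).map
      (fun (i : Int) => (i, (i >>> (s + 1)) <<< (s + 1)))))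

-- ===== PRECONDITION & SPEC =====
def Spec_P_sklansky (n : Int) (out : List (Int × Int)) : Prop := out = P_sklansky_alt n
instance (n : Int) (out : List (Int × Int)) : Decidable (Spec_P_sklansky n out) := by unfold Spec_P_sklansky; infer_instance

-- ===== CLAIM (what is proved, stated in full; the proofs are below) =====
def Claim_equal_P_sklansky : Prop := ∀ (n : Int), Dom_P_sklansky n → Spec_P_sklansky n (P_sklansky n)

-- ===== LEMMAS AND PROOFS =====

-- B's stage count and per-stage edge list, named for the proofs
def pvStages (n : Int) : Nat := if 0 < n then PySem.Int.bitLength n - 1 else 0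

def pvStageL (n : Int) (s : Nat) : List (Int × Int) :=
  ((PySem.List.pyRange 0 n 1).filter (fun (i : Int) => PySem.Int.band (i >>> s) 1 != 0)).map
    (fun (i : Int) => (i, (i >>> (s + 1)) <<< (s + 1)))

theorem pv_alt_eq (n : Int) :
    P_sklansky_alt n =
      PySem.Set.ofList ((List.range (pvStages n)).flatMap (pvStageL n)) := by
  simp only [P_sklansky_alt, pvStages]
  rfl

-- pyRange with positive step, unfolded one element at a time
theorem pv_pyRange_pos_nil {a b s : Int} (hs : 0 < s) (hab : b ≤ a) :
    PySem.List.pyRange a b s = [] := by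
  rw [PySem.List.pyRange_of_pos a b hs, if_neg (by omega)]
  rfl

theorem pv_pyRange_pos_cons {a b s : Int} (hs : 0 < s) (hab : a < b) :
    PySem.List.pyRange a b s = a :: PySem.List.pyRange (a + s) b s := by
  rw [PySem.List.pyRange_of_pos a b hs, PySem.List.pyRange_of_pos (a+s) b hs,
      if_pos hab]
  have key : b - a + s - 1 = (b - a - 1) + 1 * s := by ring
  have h1 : (b - a + s - 1) / s = (b - a - 1) / s + 1 := by
    rw [key, Int.add_mul_ediv_right _ _ (by omega)]
  have hnn : 0 ≤ (b - a - 1) / s := Int.ediv_nonneg (by omega) (by omega)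
  by_cases h2 : a + s < b
  · rw [if_pos h2]
    have : b - (a + s) + s - 1 = b - a - 1 := by ring
    rw [this, h1]
    have : ((b - a - 1) / s + 1).toNat = ((b - a - 1)/s).toNat + 1 := by omega
    rw [this, List.range_succ_eq_map]
    simp only [List.map_cons, List.map_map]
    congr 1
    · simp
    apply List.map_congr_left
    intro k _
    simp only [Function.comp_apply]
    push_cast
    ring
  · rw [if_neg h2]
    have hz : (b - a - 1) / s = 0 := by
      apply Int.ediv_eq_zero_of_lt <;> omega
    rw [h1, hz]
    simp

-- bit s of i is 0 on the lower half of a block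
theorem pv_bit_lower (s : Nat) (q r : Int) (h0 : 0 ≤ r) (hr : r < 2 ^ s) :
    PySem.Int.band ((r + 2 * q * 2 ^ s) >>> s) 1 = 0 := by
  rw [PySem.Int.band_one, Int.shiftRight_eq_div_pow]
  push_cast
  rw [Int.add_mul_ediv_right _ _ (by positivity : (2:Int)^s ≠ 0),
      Int.ediv_eq_zero_of_lt h0 hr,
      PySem.Int.mod_eq_emod_of_pos (by omega)]
  omega

-- bit s of i is 1 on the upper half, and clearing the low s+1 bits gives the block start
theorem pv_bit_upper (s : Nat) (q r : Int) (hl : 2 ^ s ≤ r) (hr : r < 2 ^ (s + 1)) :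
    PySem.Int.band ((r + q * 2 ^ (s + 1)) >>> s) 1 = 1 ∧
    ((r + q * 2 ^ (s + 1)) >>> (s + 1)) <<< (s + 1) = q * 2 ^ (s + 1) := by
  have hp : (0:Int) < 2 ^ s := by positivity
  have hps : ((2:Int) ^ (s+1)) = 2 * 2 ^ s := by rw [pow_succ]; ring
  constructor
  · rw [PySem.Int.band_one, Int.shiftRight_eq_div_pow]
    push_cast
    have : r + q * 2 ^ (s+1) = (r - 2^s) + (2 * q + 1) * 2 ^ s := by rw [hps]; ring
    rw [this, Int.add_mul_ediv_right _ _ (by positivity : (2:Int)^s ≠ 0),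
        Int.ediv_eq_zero_of_lt (by omega) (by omega),
        PySem.Int.mod_eq_emod_of_pos (by omega)]
    omega
  · rw [Int.shiftRight_eq_div_pow, Int.shiftLeft_eq]
    push_cast
    rw [Int.add_mul_ediv_right _ _ (by positivity : (2:Int)^(s+1) ≠ 0),
        Int.ediv_eq_zero_of_lt (by omega) hr]
    ring

-- one block's slice of B's filtered scan is exactly A's upper-half range paired with g
theorem pv_block (s : Nat) (q n : Int) (hg : q * 2 ^ (s + 1) < n) :
    ((PySem.List.pyRange (q * 2 ^ (s + 1)) (min (q * 2 ^ (s + 1) + 2 ^ (s + 1)) n) 1).filter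
        (fun (i : Int) => PySem.Int.band (i >>> s) 1 != 0)).map
      (fun (i : Int) => (i, (i >>> (s + 1)) <<< (s + 1)))
    = (PySem.List.pyRange (q * 2 ^ (s + 1) + 2 ^ s) (min (q * 2 ^ (s + 1) + 2 ^ (s + 1)) n) 1).map
        (fun (i : Int) => (i, q * 2 ^ (s + 1))) := by
  have hp : (0:Int) < 2 ^ s := by positivity
  have hps : ((2:Int) ^ (s+1)) = 2 * 2 ^ s := by rw [pow_succ]; ring
  set g : Int := q * 2 ^ (s + 1) with hgdef
  set m : Int := min (g + 2 ^ (s + 1)) n with hmdef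
  have hgm : g < m := by omega
  have hmb : m ≤ g + 2 ^ (s + 1) := by omega
  set mid : Int := min (g + 2 ^ s) m with hmiddef
  rw [PySem.List.pyRange_one_append g mid m (by omega) (by omega), List.filter_append,
      List.map_append]
  have hfil1 : (PySem.List.pyRange g mid 1).filter
      (fun (i : Int) => PySem.Int.band (i >>> s) 1 != 0) = [] := by
    rw [List.filter_eq_nil_iff]
    intro x hx
    rw [PySem.List.mem_pyRange_one] at hx
    have : x = (x - g) + 2 * q * 2 ^ s := by rw [hgdef, hps]; ring
    rw [this, bne_iff_ne, ne_eq, not_not]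
    exact pv_bit_lower s q (x - g) (by omega) (by omega)
  rw [hfil1]
  by_cases hc : g + 2 ^ s ≤ m
  · have hmid : mid = g + 2 ^ s := by omega
    have hfil2 : (PySem.List.pyRange mid m 1).filter
        (fun (i : Int) => PySem.Int.band (i >>> s) 1 != 0) = PySem.List.pyRange mid m 1 := by
      rw [List.filter_eq_self]
      intro x hx
      rw [PySem.List.mem_pyRange_one] at hx
      have hxw : x = (x - g) + q * 2 ^ (s + 1) := by ring
      rw [bne_iff_ne, ne_eq, hxw]
      have := (pv_bit_upper s q (x - g) (by omega) (by omega)).1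
      simp [this]
    rw [hfil2, hmid]
    rw [List.map_nil, List.nil_append]
    apply List.map_congr_left
    intro x hx
    rw [PySem.List.mem_pyRange_one] at hx
    have hxw : x = (x - g) + q * 2 ^ (s + 1) := by ring
    rw [hxw]
    rw [(pv_bit_upper s q (x - g) (by omega) (by omega)).2]
  · have hmid : mid = m := by omega
    rw [hmid, PySem.List.pyRange_one_eq_nil (le_refl m),
        PySem.List.pyRange_one_eq_nil (by omega : m ≤ g + 2 ^ s)]
    rfl

-- A's loop over blocks = one fold of Set.add over B's filtered-and-mapped scan
theorem pv_blocks (s : Nat) (n : Int) (q : Int) (hq : 0 ≤ q)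
    (acc : PySem.Set (Int × Int)) :
    (PySem.List.pyRange (q * 2 ^ (s + 1)) n (2 ^ (s + 1))).foldl (fun acc g =>
        (PySem.List.pyRange (g + 2 ^ s) (min (g + 2 ^ (s + 1) - 1) (n - 1) + 1) 1).foldl
          (fun a i => PySem.Set.add a (i, g)) acc) acc
    = (((PySem.List.pyRange (q * 2 ^ (s + 1)) n 1).filter
          (fun (i : Int) => PySem.Int.band (i >>> s) 1 != 0)).map
        (fun (i : Int) => (i, (i >>> (s + 1)) <<< (s + 1)))).foldl PySem.Set.add acc := by
  have hp : (0:Int) < 2 ^ (s+1) := by positivity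
  set g : Int := q * 2 ^ (s + 1) with hgdef
  by_cases hgn : g < n
  · have hm1 : min (g + 2 ^ (s + 1) - 1) (n - 1) + 1 = min (g + 2 ^ (s + 1)) n := by omega
    rw [pv_pyRange_pos_cons hp hgn, List.foldl_cons, hm1]
    rw [PySem.List.pyRange_one_append g (min (g + 2 ^ (s + 1)) n) n (by omega) (by omega),
        List.filter_append, List.map_append, List.foldl_append]
    have hinit : (PySem.List.pyRange (g + 2 ^ s) (min (g + 2 ^ (s + 1)) n) 1).foldl
        (fun a i => PySem.Set.add a (i, g)) acc
      = (((PySem.List.pyRange g (min (g + 2 ^ (s + 1)) n) 1).filter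
            (fun (i : Int) => PySem.Int.band (i >>> s) 1 != 0)).map
          (fun (i : Int) => (i, (i >>> (s + 1)) <<< (s + 1)))).foldl PySem.Set.add acc := by
      rw [pv_block s q n hgn, List.foldl_map]
    rw [hinit]
    by_cases hlast : g + 2 ^ (s+1) ≤ n
    · rw [show min (g + 2 ^ (s+1)) n = g + 2 ^ (s+1) from by omega]
      have hnext : g + 2 ^ (s+1) = (q + 1) * 2 ^ (s+1) := by ring
      rw [hnext]
      exact pv_blocks s n (q + 1) (by omega) _
    · rw [show min (g + 2 ^ (s+1)) n = n from by omega,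
          pv_pyRange_pos_nil hp (by omega),
          PySem.List.pyRange_one_eq_nil (le_refl n)]
      rfl
  · rw [pv_pyRange_pos_nil hp (by omega),
        PySem.List.pyRange_one_eq_nil (by omega)]
    rfl
termination_by (n - q * 2 ^ (s + 1)).toNat
decreasing_by
  have : (0:Int) < 2 ^ (s+1) := by positivity
  omega

-- the while condition holds exactly for the stages 0 ≤ s < pvStages n
theorem pv_cond (n : Int) (s : Nat) :
    ((1 : Int) <<< (s + 1) ≤ n) ↔ s < pvStages n := by
  rw [Int.shiftLeft_eq, one_mul, pvStages]
  by_cases hn : 0 < n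
  · rw [if_pos hn]
    have hbl := PySem.Int.lt_two_pow_bitLength n
    have hbl2 := PySem.Int.two_pow_bitLength_le n (by omega)
    have habs : n.natAbs = n.toNat := by omega
    rw [habs] at hbl hbl2
    have hcast : ((2:Int) ^ (s+1) ≤ n) ↔ 2 ^ (s+1) ≤ n.toNat := by
      constructor
      · intro h
        have : ((2:Nat) ^ (s+1) : Int) ≤ ((n.toNat : Nat) : Int) := by push_cast; omega
        exact_mod_cast this
      · intro h
        have : ((2:Nat) ^ (s+1) : Int) ≤ ((n.toNat : Nat) : Int) := by exact_mod_cast h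
        push_cast at this; omega
    rw [hcast]
    constructor
    · intro h
      have h2 : (2:Nat) ^ (s+1) < 2 ^ (PySem.Int.bitLength n) := by omega
      have := (Nat.pow_lt_pow_iff_right (by omega : 1 < 2)).mp h2
      omega
    · intro h
      have h2 : (2:Nat) ^ (s+1) ≤ 2 ^ (PySem.Int.bitLength n - 1) :=
        Nat.pow_le_pow_right (by omega) (by omega)
      omega
  · rw [if_neg hn]
    have : (0:Int) < 2 ^ (s+1) := by positivity
    constructor
    · intro h; omega
    · intro h; omega

-- A's while loop from stage s = a fold of Set.add over the remaining stage lists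
theorem pv_go (n : Int) (s : Nat) (acc : PySem.Set (Int × Int)) :
    P_sklansky_go n s acc
      = ((List.range' s (pvStages n - s)).flatMap (pvStageL n)).foldl PySem.Set.add acc := by
  rw [P_sklansky_go]
  by_cases h : (1 : Int) <<< (s + 1) ≤ n
  · rw [dif_pos h]
    simp only []
    have hs : s < pvStages n := (pv_cond n s).mp h
    have hhalf : (1 : Int) <<< s = 2 ^ s := by rw [Int.shiftLeft_eq, one_mul]
    have hblock : (1 : Int) <<< (s+1) = 2 ^ (s+1) := by rw [Int.shiftLeft_eq, one_mul]
    have hstage := pv_blocks s n 0 (le_refl 0) acc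
    rw [zero_mul] at hstage
    rw [hhalf, hblock, hstage]
    rw [pv_go n (s + 1) _]
    have hr : List.range' s (pvStages n - s)
        = s :: List.range' (s + 1) (pvStages n - (s + 1)) := by
      rw [show pvStages n - s = (pvStages n - (s + 1)) + 1 from by omega,
          List.range'_succ]
    rw [hr, List.flatMap_cons, List.foldl_append]
    rfl
  · rw [dif_neg h]
    have hs : pvStages n ≤ s := by
      by_contra hc
      exact h ((pv_cond n s).mpr (by omega))
    rw [show pvStages n - s = 0 from by omega]
    rfl
termination_by n.toNat - s
decreasing_by have := pv_shift_lt h; omega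

-- ===== VERDICT (by name: the statement is the Claim_ definition above) =====
theorem P_sklansky_spec : Claim_equal_P_sklansky := by
  intro n _
  unfold Spec_P_sklansky P_sklansky
  rw [pv_go n 0 PySem.Set.empty, pv_alt_eq,
      PySem.Set.ofList_eq_foldl, ← List.range_eq_range']
  rfl
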